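-- pv_equiv track=rewrite | github.com/campoppen/MLB-MAC | app.py | normalize_person_name
-- ===== SOURCE A (Python) =====
-- def normalize_person_name(name: str) -> str:
--     text = str(name or "").strip().lower()
--     replacements = {
--         ".": "",
--         ",": "",
--         "-": " ",
--     }
--     for old, new in replacements.items():
--         text = text.replace(old, new)
--     return " ".join(text.split())
-- ===== SOURCE B (Python) =====
-- def normalize_person_name(name: str) -> str:
--     text = str(name or "").strip().lower()
--     out = []
--     for ch in text:
--         if ch == "." or ch == ",":
--             continue
--         out.append(" " if ch == "-" else ch)
--     return " ".join("".join(out).split())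
-- ===== Notes on version B (the rewrite author's own statement) =====
-- stated objective: alternative
-- what changed: Replaces the three sequential full-string str.replace passes with a single explicit character-by-character loop that drops '.'/',' and maps '-' to ' ' into an accumulator, then joins/splits as before.
import Mathlib
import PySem

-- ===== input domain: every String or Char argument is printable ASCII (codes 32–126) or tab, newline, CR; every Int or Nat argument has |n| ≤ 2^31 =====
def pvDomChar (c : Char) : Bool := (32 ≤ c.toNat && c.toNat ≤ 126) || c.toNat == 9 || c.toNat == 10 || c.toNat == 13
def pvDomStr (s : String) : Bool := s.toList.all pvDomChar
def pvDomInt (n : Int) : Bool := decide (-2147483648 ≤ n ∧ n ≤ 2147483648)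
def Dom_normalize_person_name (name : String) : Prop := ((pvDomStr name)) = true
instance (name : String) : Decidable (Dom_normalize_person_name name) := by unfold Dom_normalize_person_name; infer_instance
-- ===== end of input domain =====

-- B replaces A's three sequential str.replace passes by one explicit char-by-char pass (alternative decomposition, same cost).

-- ===== PORT A =====
def normalize_person_name (name : String) : String :=
  -- text = str(name or "").strip().lower()  ('name or ""' is name unless name == "")
  let text := PySem.Str.lower (PySem.Str.strip (if name == "" then "" else name))
  -- dict iteration in insertion order = this pair list
  let replacements : List (String × String) := [(".", ""), (",", ""), ("-", " ")]
  let text := replacements.foldl (fun t p => PySem.Str.replace t p.1 p.2) text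
  PySem.Str.join " " (PySem.Str.split₀ text)

-- ===== PORT B =====
def normalize_person_name_alt (name : String) : String :=
  let text := PySem.Str.lower (PySem.Str.strip (if name == "" then "" else name))
  let cleaned := text.toList.foldl
      (fun acc c => if c = '.' ∨ c = ',' then acc else acc ++ [if c = '-' then ' ' else c])
      ([] : List Char)
  PySem.Str.join " " (PySem.Str.split₀ (String.ofList cleaned))

-- ===== PRECONDITION & SPEC =====
def Spec_normalize_person_name (name : String) (out : String) : Prop := out = normalize_person_name_alt name
instance (name : String) (out : String) : Decidable (Spec_normalize_person_name name out) := by unfold Spec_normalize_person_name; infer_instance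

-- ===== CLAIM (what is proved, stated in full; the proofs are below) =====
def Claim_equal_normalize_person_name : Prop := ∀ (name : String), Dom_normalize_person_name name → Spec_normalize_person_name name (normalize_person_name name)

-- ===== LEMMAS AND PROOFS =====

-- replace with a single-char pattern is a flatMap over characters
theorem replace_go_single (o : Char) (new : List Char) (fuel : Nat) (l acc : List Char)
    (h : l.length ≤ fuel) :
    PySem.Chars.replace.go [o] new fuel l acc
      = acc.reverse ++ l.flatMap (fun c => if c = o then new else [c]) := by
  induction fuel generalizing l acc with
  | zero =>
    cases l with
    | nil => simp [PySem.Chars.replace.go]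
    | cons c t => simp at h
  | succ fuel ih =>
    cases l with
    | nil => simp [PySem.Chars.replace.go]
    | cons c t =>
      simp only [List.length_cons, Nat.succ_le_succ_iff] at h
      by_cases hc : c = o
      · subst hc
        have hpre : [c].isPrefixOf (c :: t) = true := by simp [List.isPrefixOf]
        simp only [PySem.Chars.replace.go, hpre, if_true]
        rw [ih _ _ (by simpa using h)]
        simp
      · have hpre : [o].isPrefixOf (c :: t) = false := by
          simp [List.isPrefixOf]; exact fun hco => (hc hco.symm).elim
        simp only [PySem.Chars.replace.go, hpre]
        rw [ih _ _ h]
        simp [hc]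

theorem replace_single (s : List Char) (o : Char) (new : List Char) :
    PySem.Chars.replace s [o] new = s.flatMap (fun c => if c = o then new else [c]) := by
  unfold PySem.Chars.replace
  simp only [List.isEmpty_cons, Bool.false_eq_true, if_false]
  simpa using replace_go_single o new s.length s [] (le_refl _)

-- B's accumulator loop is a flatMap too
theorem foldl_clean (cs acc : List Char) :
    cs.foldl (fun acc c => if c = '.' ∨ c = ',' then acc else acc ++ [if c = '-' then ' ' else c]) acc
      = acc ++ cs.flatMap (fun c => if c = '.' ∨ c = ',' then [] else [if c = '-' then ' ' else c]) := by
  induction cs generalizing acc with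
  | nil => simp
  | cons c t ih =>
    simp only [List.foldl_cons, List.flatMap_cons, ih]
    by_cases h : c = '.' ∨ c = ','
    · simp [h]
    · simp [h]

-- the three passes compose to B's single pass
theorem three_passes (cs : List Char) :
    ((cs.flatMap (fun c => if c = '.' then [] else [c])).flatMap
        (fun c => if c = ',' then [] else [c])).flatMap
        (fun c => if c = '-' then [' '] else [c])
      = cs.flatMap (fun c => if c = '.' ∨ c = ',' then [] else [if c = '-' then ' ' else c]) := by
  induction cs with
  | nil => simp
  | cons c t ih =>
    simp only [List.flatMap_cons, List.flatMap_append, ih]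
    congr 1
    by_cases h1 : c = '.'
    · simp [h1]
    · by_cases h2 : c = ','
      · simp [h2]
      · by_cases h3 : c = '-' <;> simp [h1, h2, h3]

theorem toList_core (name : String) :
    let text := PySem.Str.lower (PySem.Str.strip (if name == "" then "" else name))
    (PySem.Str.replace (PySem.Str.replace (PySem.Str.replace text "." "") "," "") "-" " ").toList
      = text.toList.foldl
          (fun acc c => if c = '.' ∨ c = ',' then acc else acc ++ [if c = '-' then ' ' else c]) [] := by
  intro text
  simp only [PySem.Str.toList_replace, foldl_clean, List.nil_append]
  have h1 : ("." : String).toList = ['.'] := rfl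
  have h2 : ("," : String).toList = [','] := rfl
  have h3 : ("-" : String).toList = ['-'] := rfl
  have h4 : ("" : String).toList = [] := rfl
  have h5 : (" " : String).toList = [' '] := rfl
  rw [h1, h2, h3, h4, h5, replace_single, replace_single, replace_single, three_passes]

-- ===== VERDICT (by name: the statement is the Claim_ definition above) =====
theorem join_split_cong (s t : String) (h : s.toList = t.toList) :
    PySem.Str.join " " (PySem.Str.split₀ s) = PySem.Str.join " " (PySem.Str.split₀ t) := by
  rw [String.toList_inj.mp h]

theorem normalize_person_name_spec : Claim_equal_normalize_person_name := by
  intro name _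
  unfold Spec_normalize_person_name normalize_person_name normalize_person_name_alt
  dsimp only
  simp only [List.foldl_cons, List.foldl_nil]
  have h := toList_core name
  simp only at h
  exact join_split_cong _ _ (by rw [h, String.toList_ofList])
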